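-- pv_equiv track=rewrite | github.com/techindky/DSA_Codes | LeetCode/NumberOfPerfectPairs.py | perfectPairs
-- ===== SOURCE A (Python) =====
-- from typing import List
--
-- import bisect
--
-- class FenwickTree:
--     def __init__(self, size):
--         self.tree = [0] * (size + 1)
--         self.size = size
--
--     def update(self, index, delta):
--         index += 1
--         while index <= self.size:
--             self.tree[index] += delta
--             index += index & (-index)
--
--     def query(self, index):
--         index +=1
--         s = 0
--         while index > 0:
--             s += self.tree[index]
--             index -= index & (-index)
--         return s
--
--     def query_range(self, left, right):
--         if left > right:
--             return 0
--         return self.query(right) - self.query(left - 1)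
--
-- def perfectPairs(nums: List[int]) -> int:
--     temp = nums
--     n = len(temp)
--     count = 0
--
--     value_set = set()
--     for x in temp:
--         value_set.add(abs(x))
--
--     sorted_values = sorted(list(value_set))
--     rank_map = {val: i for i, val in enumerate(sorted_values)}
--     max_rank = len(sorted_values)
--
--     ft = FenwickTree(max_rank)
--     for i in range(n):
--         current_val = abs(temp[i])
--         lower_bound_val = (current_val + 1) // 2 if current_val != 0 else 0
--         upper_bound_val = 2 * current_val
--         low_idx = bisect.bisect_left(sorted_values, lower_bound_val)
--         upper_idx = bisect.bisect_right(sorted_values, upper_bound_val) - 1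
--         count += ft.query_range(low_idx, upper_idx)
--         ft.update(rank_map[current_val], 1)
--
--     return count
-- ===== SOURCE B (Python) =====
-- from typing import List
--
-- def perfectPairs(nums: List[int]) -> int:
--     # Sort the absolute values; a pair is "perfect" iff the larger abs value is
--     # at most twice the smaller, so on the sorted list a two-pointer window
--     # counts, for each j, the earlier i with 2*s[i] >= s[j].
--     s = sorted(abs(x) for x in nums)
--     count = 0
--     i = 0
--     for j in range(len(s)):
--         while 2 * s[i] < s[j]:
--             i += 1
--         count += j - i
--     return count
-- ===== Notes on version B (the rewrite author's own statement) =====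
-- stated objective: faster
-- what changed: Replaced the coordinate-compression + Fenwick-tree counting (per element: two bisects, a dict lookup and log-time BIT query/update) with a sort of the absolute values followed by a single two-pointer sliding window that counts, for each element, the earlier elements within a factor of two.
import Mathlib
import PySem

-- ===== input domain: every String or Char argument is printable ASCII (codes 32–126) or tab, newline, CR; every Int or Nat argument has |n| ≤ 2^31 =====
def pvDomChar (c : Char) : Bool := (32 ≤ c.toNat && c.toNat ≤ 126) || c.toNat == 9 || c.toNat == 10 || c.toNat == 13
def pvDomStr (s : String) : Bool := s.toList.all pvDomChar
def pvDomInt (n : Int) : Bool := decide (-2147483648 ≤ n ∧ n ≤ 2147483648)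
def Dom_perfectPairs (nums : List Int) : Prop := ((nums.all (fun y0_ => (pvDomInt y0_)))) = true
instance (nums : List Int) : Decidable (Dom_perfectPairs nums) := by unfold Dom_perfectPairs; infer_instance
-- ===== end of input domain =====

-- B replaces A's coordinate-compression + Fenwick-tree counting by a sort of the
-- absolute values followed by one two-pointer sliding window (measured faster by a
-- constant factor). Neither version mutates its argument.

-- ===== PORT A =====

-- The two facts the ports' termination measures cite: for index ≥ 1,
-- index & (-index) (Python's lowest-set-bit idiom) is positive and at most index.
theorem pv_band_eq (i : Int) (h : 1 ≤ i) :
    PySem.Int.band i (-i) = ((i.toNat - (i.toNat &&& (i.toNat - 1)) : Nat) : Int) := by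
  unfold PySem.Int.band
  have h1 : 0 ≤ i := by omega
  simp [h1]
  omega

theorem pv_band_pos (i : Int) (h : 1 ≤ i) : 0 < PySem.Int.band i (-i) := by
  rw [pv_band_eq i h]
  have hl : i.toNat &&& (i.toNat - 1) ≤ i.toNat - 1 := Nat.and_le_right
  omega

theorem pv_band_le (i : Int) (h : 1 ≤ i) : PySem.Int.band i (-i) ≤ i := by
  rw [pv_band_eq i h]
  omega

-- index & (-index) on a positive index; for 0 < i, PySem.Int.band i (-i) is the lowest set bit.
-- 'tree[index] += delta' is pySetD/pyGetD; the '1 ≤ index' tests below are totality guards only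
-- (every index reached is ≥ 1, matching Python exactly).

-- FenwickTree.update's while loop: while index <= size: tree[index] += delta; index += index & (-index)
def fenwickUpdateLoop (tree : List Int) (size index delta : Int) : List Int :=
  if h : 1 ≤ index ∧ index ≤ size then
    fenwickUpdateLoop
      (PySem.List.pySetD tree index (PySem.List.pyGetD tree index 0 + delta))
      size (index + PySem.Int.band index (-index)) delta
  else tree
termination_by (size + 1 - index).toNat
decreasing_by
  have hb : 0 < PySem.Int.band index (-index) := pv_band_pos index h.1
  omega

-- FenwickTree.query's while loop: while index > 0: s += tree[index]; index -= index & (-index)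
def fenwickQueryLoop (tree : List Int) (index s : Int) : Int :=
  if h : 1 ≤ index then
    fenwickQueryLoop tree (index - PySem.Int.band index (-index)) (s + PySem.List.pyGetD tree index 0)
  else s
termination_by index.toNat
decreasing_by
  have hb : 0 < PySem.Int.band index (-index) := pv_band_pos index h
  have hle : PySem.Int.band index (-index) ≤ index := pv_band_le index h
  omega

structure Fenwick where
  tree : List Int
  size : Int
deriving Repr, DecidableEq

-- FenwickTree.__init__(size): tree = [0]*(size+1) (size+1 ≥ 1 at the call site, so toNat is exact)
def fenwickInit (size : Int) : Fenwick := ⟨List.replicate (size + 1).toNat 0, size⟩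

def fenwickUpdate (f : Fenwick) (index delta : Int) : Fenwick :=
  ⟨fenwickUpdateLoop f.tree f.size (index + 1) delta, f.size⟩

def fenwickQuery (f : Fenwick) (index : Int) : Int :=
  fenwickQueryLoop f.tree (index + 1) 0

def fenwickQueryRange (f : Fenwick) (left right : Int) : Int :=
  if left > right then 0 else fenwickQuery f right - fenwickQuery f (left - 1)

-- the main 'for i in range(n)' loop of perfectPairs, state (ft, count)
def perfectPairsLoop (temp sorted_values : List Int) (rank_map : PySem.Dict Int Int)
    (ft : Fenwick) (count : Int) (i n : Nat) : Int :=
  if i < n then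
    let current_val := |PySem.List.pyGetD temp (i : Int) 0|
    let lower_bound_val := if current_val ≠ 0 then PySem.Int.floordiv (current_val + 1) 2 else 0
    let upper_bound_val := 2 * current_val
    let low_idx : Int := (PySem.List.bisectLeft sorted_values lower_bound_val : Int)
    let upper_idx : Int := (PySem.List.bisectRight sorted_values upper_bound_val : Int) - 1
    -- rank_map[current_val]: the key is always present, so getD's default is never read
    perfectPairsLoop temp sorted_values rank_map
      (fenwickUpdate ft (rank_map.getD current_val 0) 1)
      (count + fenwickQueryRange ft low_idx upper_idx) (i + 1) n
  else count
termination_by n - i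

def perfectPairs (nums : List Int) : Int :=
  let temp := nums
  let n := temp.length
  -- value_set = set(); for x in temp: value_set.add(abs(x))
  let value_set : PySem.Set Int := temp.foldl (fun s x => PySem.Set.add s |x|) PySem.Set.empty
  -- sorted(list(value_set)): sorted() of the set's elements (order of list(value_set) is irrelevant under sorted)
  let sorted_values := PySem.List.sorted value_set (fun v => v) false
  -- rank_map = {val: i for i, val in enumerate(sorted_values)}
  let rank_map : PySem.Dict Int Int :=
    (PySem.List.enumerate sorted_values 0).foldl (fun d p => d.insert p.2 p.1) PySem.Dict.empty
  let max_rank : Int := (sorted_values.length : Int)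
  perfectPairsLoop temp sorted_values rank_map (fenwickInit max_rank) 0 0 n

-- ===== PORT B =====

-- the inner 'while 2 * s[i] < s[j]: i += 1' (it never passes j, since 2*s[j] ≥ s[j] for the
-- non-negative sorted values; 'i < j' is a totality guard expressing exactly that)
def altAdvance (s : List Int) (sj : Int) (i j : Nat) : Nat :=
  if h : i < j then (if 2 * s.getD i 0 < sj then altAdvance s sj (i + 1) j else i) else i
termination_by j - i

-- the 'for j in range(len(s))' loop of B, state (i, count)
def altLoop (s : List Int) (i j n : Nat) (count : Int) : Int :=
  if j < n then
    let i' := altAdvance s (s.getD j 0) i j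
    altLoop s i' (j + 1) n (count + (j : Int) - (i' : Int))
  else count
termination_by n - j

def perfectPairs_alt (nums : List Int) : Int :=
  let s := PySem.List.sorted (nums.map (fun x => |x|)) (fun v => v) false
  altLoop s 0 0 s.length 0

-- ===== PRECONDITION & SPEC =====
def Spec_perfectPairs (nums : List Int) (out : Int) : Prop := out = perfectPairs_alt nums
instance (nums : List Int) (out : Int) : Decidable (Spec_perfectPairs nums out) := by unfold Spec_perfectPairs; infer_instance

-- ===== CLAIM (what is proved, stated in full; the proofs are below) =====
def Claim_equal_perfectPairs : Prop := ∀ (nums : List Int), Dom_perfectPairs nums → Spec_perfectPairs nums (perfectPairs nums)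

-- ===== LEMMAS AND PROOFS =====

-- ---- lowest-set-bit arithmetic ----

def lbN (a : Nat) : Nat := a - (a &&& (a - 1))

theorem pv_land_odd (m : Nat) : (2 * m + 1) &&& (2 * m) = 2 * m := by
  apply Nat.eq_of_testBit_eq; intro j
  simp only [Nat.testBit_and]
  cases j with
  | zero => simp
  | succ j =>
      simp only [Nat.testBit_succ]
      have h1 : (2 * m + 1) / 2 = m := by omega
      have h2 : (2 * m) / 2 = m := by omega
      rw [h1, h2]; simp

theorem pv_land_even (m : Nat) (hm : 0 < m) : (2 * m) &&& (2 * m - 1) = 2 * (m &&& (m - 1)) := by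
  apply Nat.eq_of_testBit_eq; intro j
  simp only [Nat.testBit_and]
  cases j with
  | zero => simp [Nat.testBit_zero]
  | succ j =>
      simp only [Nat.testBit_succ]
      have h1 : (2 * m) / 2 = m := by omega
      have h2 : (2 * m - 1) / 2 = m - 1 := by omega
      have h3 : (2 * (m &&& (m - 1))) / 2 = m &&& (m - 1) := by omega
      rw [h1, h2, h3, Nat.testBit_and]

theorem lbN_spec (a : Nat) (h : 0 < a) :
    ∃ k : Nat, lbN a = 2 ^ k ∧ 2 ^ k ∣ a ∧ ¬ 2 ^ (k + 1) ∣ a := by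
  induction a using Nat.strong_induction_on with
  | _ a ih =>
    rcases Nat.even_or_odd a with he | ho
    · obtain ⟨m, hm⟩ := he
      have hm' : a = 2 * m := by omega
      have hmpos : 0 < m := by omega
      obtain ⟨k, hk1, hk2, hk3⟩ := ih m (by omega) hmpos
      have hland : m &&& (m - 1) = m - 2 ^ k := by
        have hle : m &&& (m - 1) ≤ m := Nat.and_le_left
        unfold lbN at hk1
        have h2k : 2 ^ k ≤ m := Nat.le_of_dvd hmpos hk2
        omega
      refine ⟨k + 1, ?_, ?_, ?_⟩
      · unfold lbN
        rw [hm', pv_land_even m hmpos, hland, pow_succ]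
        have h2k : 2 ^ k ≤ m := Nat.le_of_dvd hmpos hk2
        omega
      · obtain ⟨c, hc⟩ := hk2
        exact ⟨c, by rw [hm', hc, pow_succ]; ring⟩
      · rw [hm']
        rintro ⟨c, hc⟩
        apply hk3
        refine ⟨c, ?_⟩
        have h2 : 2 * m = 2 * (2 ^ (k + 1) * c) := by
          rw [hc]; ring
        omega
    · obtain ⟨m, hm⟩ := ho
      refine ⟨0, ?_, one_dvd a, ?_⟩
      · unfold lbN
        have h2 : a - 1 = 2 * m := by omega
        have : a &&& (a - 1) = a - 1 := by
          rw [h2, hm, pv_land_odd]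
        omega
      · rintro ⟨c, hc⟩; omega

theorem lbN_pos (a : Nat) (h : 0 < a) : 0 < lbN a := by
  obtain ⟨k, hk1, _, _⟩ := lbN_spec a h
  rw [hk1]; positivity

theorem lbN_le (a : Nat) : lbN a ≤ a := by
  unfold lbN; omega

-- two indices whose Fenwick intervals both contain p are at least lbN i apart
theorem pv_gap (p i j : Nat) (hpi : p ≤ i) (hi : i - lbN i < p)
    (hj : j - lbN j < p) (hij : i < j) : i + lbN i ≤ j := by
  obtain ⟨b, hb1, hb2, _⟩ := lbN_spec i (by omega)
  obtain ⟨a, ha1, ha2, _⟩ := lbN_spec j (by omega)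
  rcases le_or_gt a b with hab | hab
  · exfalso
    have hdi : 2 ^ a ∣ i := dvd_trans (pow_dvd_pow 2 hab) hb2
    have hsub : 2 ^ a ∣ j - i := Nat.dvd_sub ha2 hdi
    have : 2 ^ a ≤ j - i := Nat.le_of_dvd (by omega) hsub
    rw [ha1] at hj
    omega
  · have hdj : 2 ^ b ∣ j := dvd_trans (pow_dvd_pow 2 (by omega : b ≤ a)) ha2
    have hsub : 2 ^ b ∣ j - i := Nat.dvd_sub hdj hb2
    have : 2 ^ b ≤ j - i := Nat.le_of_dvd (by omega) hsub
    rw [hb1]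
    omega

-- climbing one step keeps the Fenwick interval around p
theorem pv_path_step (p i : Nat) (hpi : p ≤ i) (hp : 0 < p) (hi : i - lbN i < p) :
    (i + lbN i) - lbN (i + lbN i) < p := by
  obtain ⟨b, hb1, hb2, hb3⟩ := lbN_spec i (by omega)
  have hble : 2 ^ b ≤ i := Nat.le_of_dvd (by omega) hb2
  obtain ⟨c, hc⟩ := hb2
  have hcodd : c % 2 = 1 := by
    rcases Nat.even_or_odd c with hce | hco
    · exfalso; apply hb3
      obtain ⟨d, hd⟩ := hce
      exact ⟨d, by rw [hc, hd, pow_succ]; ring⟩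
    · obtain ⟨d, hd⟩ := hco; omega
  have hdvd2 : 2 ^ (b + 1) ∣ i + 2 ^ b := by
    refine ⟨(c + 1) / 2, ?_⟩
    have hce : c + 1 = 2 * ((c + 1) / 2) := by omega
    calc i + 2 ^ b = 2 ^ b * (c + 1) := by rw [hc]; ring
    _ = 2 ^ b * (2 * ((c + 1) / 2)) := by rw [← hce]
    _ = 2 ^ (b + 1) * ((c + 1) / 2) := by rw [pow_succ]; ring
  obtain ⟨k2, hk1, hk2, hk3⟩ := lbN_spec (i + lbN i) (by have := lbN_pos i (by omega); omega)
  rw [hb1] at hk1 hk2 hk3 ⊢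
  have hk2b : 2 ^ (b + 1) ≤ 2 ^ k2 := by
    apply pow_le_pow_right₀ (by omega)
    by_contra hlt
    exact hk3 (dvd_trans (pow_dvd_pow 2 (by omega : k2 + 1 ≤ b + 1)) hdvd2)
  have h2b1 : 2 ^ (b + 1) = 2 * 2 ^ b := by rw [pow_succ]; ring
  omega

theorem pv_band_lbN (m : Nat) (h : 0 < m) :
    PySem.Int.band (↑m) (-↑m) = ((lbN m : Nat) : Int) := by
  rw [pv_band_eq _ (by omega)]
  unfold lbN
  simp

-- ---- Fenwick-tree invariant ----

-- prefix sums of a count function over positions 1..m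
def pvS (c : Nat → Int) : Nat → Int
  | 0 => 0
  | m + 1 => pvS c m + c (m + 1)

def pvBump (c : Nat → Int) (p : Nat) (δ : Int) : Nat → Int :=
  fun q => if q = p then c q + δ else c q

theorem pvS_bump (c : Nat → Int) (p : Nat) (δ : Int) (hp : 1 ≤ p) (m : Nat) :
    pvS (pvBump c p δ) m = pvS c m + (if p ≤ m then δ else 0) := by
  induction m with
  | zero => simp [pvS]; omega
  | succ m ih =>
      simp only [pvS, ih, pvBump]
      by_cases h1 : m + 1 = p
      · have h2 : ¬ p ≤ m := by omega
        have h3 : p ≤ m + 1 := by omega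
        simp [h1, h2, h3]
        ring
      · by_cases h2 : p ≤ m
        · have h3 : p ≤ m + 1 := by omega
          simp [h1, h2, h3]
          ring
        · have h3 : ¬ p ≤ m + 1 := by omega
          simp [h1, h2, h3]

theorem pv_getD_set (l : List Int) (i j : Nat) (v : Int) :
    (l.set i v).getD j 0 = if i = j ∧ i < l.length then v else l.getD j 0 := by
  simp only [List.getD_eq_getElem?_getD, List.getElem?_set]
  by_cases h1 : i = j
  · subst h1
    by_cases h2 : i < l.length
    · simp [h2]
    · simp [h2]
  · simp [h1]

theorem pv_query (t : List Int) (size : Nat) (c : Nat → Int)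
    (hinv : ∀ p : Nat, 1 ≤ p → p ≤ size → t.getD p 0 = pvS c p - pvS c (p - lbN p)) :
    ∀ m : Nat, m ≤ size → ∀ s : Int, fenwickQueryLoop t (↑m) s = s + pvS c m := by
  intro m
  induction m using Nat.strong_induction_on with
  | _ m ih =>
    intro hm s
    rw [fenwickQueryLoop]
    by_cases h1 : 1 ≤ m
    · have h1' : (1 : Int) ≤ ↑m := by exact_mod_cast h1
      rw [dif_pos h1']
      rw [pv_band_lbN m (by omega)]
      have hle : lbN m ≤ m := lbN_le m
      have hcast : (↑m : Int) - ↑(lbN m) = ↑(m - lbN m) := by omega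
      rw [hcast]
      rw [ih (m - lbN m) (by have := lbN_pos m (by omega); omega) (by omega)]
      have hget : PySem.List.pyGetD t (↑m) 0 = t.getD m 0 := by
        simp [PySem.List.pyGetD_natCast]
      rw [hget, hinv m h1 hm]
      have : pvS c m = pvS c (m - lbN m) + (pvS c m - pvS c (m - lbN m)) := by ring
      omega
    · have h0 : m = 0 := by omega
      have h1' : ¬ (1 : Int) ≤ ↑m := by omega
      rw [dif_neg h1']
      subst h0
      simp [pvS]

theorem pv_climb (size p : Nat) (δ : Int) (c : Nat → Int) (hp : 1 ≤ p) :
    ∀ (d i : Nat) (t : List Int), size + 1 - i ≤ d → p ≤ i → i - lbN i < p →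
      t.length = size + 1 →
      (∀ j : Nat, 1 ≤ j → j ≤ size →
        t.getD j 0 = if i ≤ j ∧ j - lbN j < p
          then pvS c j - pvS c (j - lbN j)
          else pvS (pvBump c p δ) j - pvS (pvBump c p δ) (j - lbN j)) →
      (fenwickUpdateLoop t ↑size ↑i δ).length = size + 1 ∧
      (∀ j : Nat, 1 ≤ j → j ≤ size →
        (fenwickUpdateLoop t ↑size ↑i δ).getD j 0
          = pvS (pvBump c p δ) j - pvS (pvBump c p δ) (j - lbN j)) := by
  intro d
  induction d with
  | zero =>
      intro i t hd hpi hpath hlen H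
      rw [fenwickUpdateLoop]
      have : ¬ ((1 : Int) ≤ ↑i ∧ (↑i : Int) ≤ ↑size) := by
        intro ⟨_, h2⟩
        have : i ≤ size := by exact_mod_cast h2
        omega
      rw [dif_neg this]
      refine ⟨hlen, fun j h1 h2 => ?_⟩
      have : ¬ (i ≤ j ∧ j - lbN j < p) := by
        intro ⟨hij, _⟩; omega
      rw [H j h1 h2, if_neg this]
  | succ d ihd =>
      intro i t hd hpi hpath hlen H
      by_cases his : i ≤ size
      · rw [fenwickUpdateLoop]
        have hguard : ((1 : Int) ≤ ↑i ∧ (↑i : Int) ≤ ↑size) := by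
          constructor <;> [exact_mod_cast (by omega : 1 ≤ i); exact_mod_cast his]
        rw [dif_pos hguard]
        rw [pv_band_lbN i (by omega)]
        have hlb : 0 < lbN i := lbN_pos i (by omega)
        have hcast : (↑i : Int) + ↑(lbN i) = ↑(i + lbN i) := by push_cast; ring
        rw [hcast]
        have hset : PySem.List.pySetD t (↑i) (PySem.List.pyGetD t (↑i) 0 + δ)
            = t.set i (t.getD i 0 + δ) := by
          simp [PySem.List.pySetD_natCast, PySem.List.pyGetD_natCast]
        rw [hset]
        apply ihd (i + lbN i) (t.set i (t.getD i 0 + δ)) (by omega) (by omega)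
          (pv_path_step p i hpi (by omega) hpath)
          (by rw [List.length_set]; exact hlen)
        intro j h1 h2
        rw [pv_getD_set]
        by_cases hji : i = j
        · subst hji
          have hlt : i < t.length := by omega
          rw [if_pos ⟨rfl, hlt⟩]
          have hcond : (i ≤ i ∧ i - lbN i < p) := ⟨le_refl i, hpath⟩
          rw [H i h1 h2, if_pos hcond]
          have hne : ¬ (i + lbN i ≤ i ∧ i - lbN i < p) := by
            intro ⟨hc1, _⟩; omega
          rw [if_neg hne]
          rw [pvS_bump c p δ hp i, pvS_bump c p δ hp (i - lbN i)]
          have hc1 : p ≤ i := hpi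
          have hc2 : ¬ p ≤ i - lbN i := by omega
          simp [hc1, hc2]
          ring
        · rw [if_neg (by intro ⟨h, _⟩; exact hji h)]
          rw [H j h1 h2]
          by_cases hcond : i ≤ j ∧ j - lbN j < p
          · have hij : i < j := by
              rcases Nat.lt_or_ge i j with h | h
              · exact h
              · exfalso; exact hji (by omega)
            have : i + lbN i ≤ j := pv_gap p i j hpi hpath hcond.2 hij
            rw [if_pos hcond, if_pos ⟨this, hcond.2⟩]
          · have : ¬ (i + lbN i ≤ j ∧ j - lbN j < p) := by
              intro ⟨hc1, hc2⟩
              exact hcond ⟨by omega, hc2⟩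
            rw [if_neg hcond, if_neg this]
      · rw [fenwickUpdateLoop]
        have : ¬ ((1 : Int) ≤ ↑i ∧ (↑i : Int) ≤ ↑size) := by
          intro ⟨_, h2⟩
          have : i ≤ size := by exact_mod_cast h2
          omega
        rw [dif_neg this]
        refine ⟨hlen, fun j h1 h2 => ?_⟩
        have : ¬ (i ≤ j ∧ j - lbN j < p) := by
          intro ⟨hij, _⟩; omega
        rw [H j h1 h2, if_neg this]

theorem pv_update (t : List Int) (size p : Nat) (δ : Int) (c : Nat → Int)
    (hp : 1 ≤ p) (hps : p ≤ size) (hlen : t.length = size + 1)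
    (hinv : ∀ q : Nat, 1 ≤ q → q ≤ size → t.getD q 0 = pvS c q - pvS c (q - lbN q)) :
    (fenwickUpdateLoop t ↑size ↑p δ).length = size + 1 ∧
    (∀ j : Nat, 1 ≤ j → j ≤ size →
      (fenwickUpdateLoop t ↑size ↑p δ).getD j 0
        = pvS (pvBump c p δ) j - pvS (pvBump c p δ) (j - lbN j)) := by
  apply pv_climb size p δ c hp (size + 1 - p) p t (by omega) (le_refl p)
    (by have := lbN_pos p (by omega); omega) hlen
  intro j h1 h2
  rw [hinv j h1 h2]
  by_cases hcond : p ≤ j ∧ j - lbN j < p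
  · rw [if_pos hcond]
  · rw [if_neg hcond]
    rw [pvS_bump c p δ hp j, pvS_bump c p δ hp (j - lbN j)]
    have hle : lbN j ≤ j := lbN_le j
    by_cases hc1 : p ≤ j
    · have hc2 : p ≤ j - lbN j := by
        rcases Nat.lt_or_ge (j - lbN j) p with h | h
        · exact absurd ⟨hc1, h⟩ hcond
        · exact h
      simp [hc1, hc2]
    · have hc2 : ¬ p ≤ j - lbN j := by omega
      simp [hc1, hc2]


-- ---- symmetric pair counting ----

def pvQ (x y : Int) : Bool := decide (x ≤ 2 * y ∧ y ≤ 2 * x)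

def pairsCnt : List Int → Int
  | [] => 0
  | x :: r => (r.countP (pvQ x) : Int) + pairsCnt r

def betweenCnt (pref : List Int) : List Int → Int
  | [] => 0
  | x :: r => (pref.countP (pvQ x) : Int) + betweenCnt pref r

theorem pvQ_symm (x y : Int) : pvQ x y = pvQ y x := by
  unfold pvQ
  rw [decide_eq_decide]
  tauto

theorem betweenCnt_nil (l : List Int) : betweenCnt [] l = 0 := by
  induction l with
  | nil => rfl
  | cons x r ih => simp [betweenCnt, ih]

theorem betweenCnt_append_singleton (pref l : List Int) (x : Int) :
    betweenCnt (pref ++ [x]) l = betweenCnt pref l + (l.countP (pvQ x) : Int) := by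
  induction l with
  | nil => simp [betweenCnt]
  | cons y r ih =>
      simp only [betweenCnt, ih, List.countP_append, List.countP_cons, List.countP_nil]
      have hs : pvQ y x = pvQ x y := pvQ_symm y x
      by_cases h : pvQ x y = true
      · simp [h, hs]
        ring
      · rw [hs, if_neg (by simp [h])]
        push_cast
        ring

-- total ordered-pair count and diagonal, both plainly permutation invariant
def pvT (l : List Int) : Int := (l.map (fun x => (l.countP (pvQ x) : Int))).sum

theorem two_pairsCnt (l : List Int) :
    2 * pairsCnt l + (l.countP (fun x => pvQ x x) : Int) = pvT l := by
  induction l with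
  | nil => simp [pairsCnt, pvT]
  | cons x r ih =>
      unfold pvT at ih ⊢
      simp only [pairsCnt, List.map_cons, List.sum_cons, List.countP_cons]
      have hmap : r.map (fun y => (((r.countP (pvQ y) + if pvQ y x = true then 1 else 0) : Nat) : Int))
          = r.map (fun y => (r.countP (pvQ y) : Int) + (if pvQ y x = true then (1 : Int) else 0)) := by
        apply List.map_congr_left
        intro y _
        by_cases h : pvQ y x = true <;> simp [h]
      rw [hmap, PySem.List.sum_map_add_int, PySem.List.sum_map_ite_one_zero]
      have hsymmC : r.countP (fun y => pvQ y x) = r.countP (pvQ x) := by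
        apply List.countP_congr
        intro y _
        rw [pvQ_symm]
      rw [hsymmC, ← ih]
      by_cases h : pvQ x x = true <;> simp [h] <;> ring

theorem pvT_perm (l l' : List Int) (h : l.Perm l') : pvT l = pvT l' := by
  unfold pvT
  have h1 : l.map (fun x => (l.countP (pvQ x) : Int)) = l.map (fun x => (l'.countP (pvQ x) : Int)) := by
    apply List.map_congr_left
    intro x _
    rw [h.countP_eq]
  rw [h1]
  exact (h.map _).sum_eq

theorem pairsCnt_perm (l l' : List Int) (h : l.Perm l') : pairsCnt l = pairsCnt l' := by
  have h1 := two_pairsCnt l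
  have h2 := two_pairsCnt l'
  rw [pvT_perm l l' h] at h1
  rw [h.countP_eq] at h1
  omega

-- ---- A side: rank window and loop invariant ----

def cntF (sv pref : List Int) : Nat → Int :=
  fun q => ((pref.countP (fun y => decide (sv.idxOf y + 1 = q))) : Int)

theorem pv_countP_disj (l : List Int) (p q pq : Int → Bool)
    (h : ∀ y, pq y = true ↔ (p y = true ∨ q y = true))
    (hx : ∀ y, ¬ (p y = true ∧ q y = true)) :
    l.countP pq = l.countP p + l.countP q := by
  induction l with
  | nil => simp
  | cons z r ih =>
      rw [List.countP_cons, List.countP_cons, List.countP_cons, ih]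
      by_cases hp : p z = true
      · have hq : ¬ q z = true := fun hq => hx z ⟨hp, hq⟩
        have hpq : pq z = true := (h z).mpr (Or.inl hp)
        rw [if_pos hpq, if_pos hp, if_neg hq]
        omega
      · by_cases hq : q z = true
        · have hpq : pq z = true := (h z).mpr (Or.inr hq)
          rw [if_pos hpq, if_pos hq, if_neg hp]
          omega
        · have hpq : ¬ pq z = true := fun hpq => by
            rcases (h z).mp hpq with h1 | h1
            · exact hp h1
            · exact hq h1
          rw [if_neg hpq, if_neg hp, if_neg hq]
          omega

theorem pv_countP_le_succ (pref : List Int) (f : Int → Nat) (m : Nat) :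
    pref.countP (fun y => decide (f y + 1 ≤ m + 1))
      = pref.countP (fun y => decide (f y + 1 ≤ m))
        + pref.countP (fun y => decide (f y + 1 = m + 1)) := by
  apply pv_countP_disj
  · intro y; simp; omega
  · intro y; simp; omega

theorem pv_countP_split (pref : List Int) (f : Int → Nat) (m1 m2 : Nat) (h : m1 ≤ m2) :
    pref.countP (fun y => decide (f y + 1 ≤ m2))
      = pref.countP (fun y => decide (f y + 1 ≤ m1))
        + pref.countP (fun y => decide (m1 < f y + 1 ∧ f y + 1 ≤ m2)) := by
  apply pv_countP_disj
  · intro y; simp; omega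
  · intro y; simp; omega

theorem pvS_cnt (sv pref : List Int) (m : Nat) :
    pvS (cntF sv pref) m = ((pref.countP (fun y => decide (sv.idxOf y + 1 ≤ m))) : Int) := by
  induction m with
  | zero =>
      simp only [pvS]
      rw [List.countP_eq_zero.mpr (by intro y _; simp)]
      simp
  | succ m ih =>
      simp only [pvS, ih, cntF]
      rw [pv_countP_le_succ pref (fun y => sv.idxOf y) m]
      push_cast
      ring

-- the lb/ub window on ranks is exactly the perfect-pair predicate on values
theorem pv_window (sv : List Int) (hlt : sv.Pairwise (· < ·)) (x y : Int)
    (hx : 0 ≤ x) (hy : 0 ≤ y) (hmem : y ∈ sv) :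
    (PySem.List.bisectLeft sv (if x ≠ 0 then PySem.Int.floordiv (x + 1) 2 else 0) ≤ sv.idxOf y
      ∧ sv.idxOf y < PySem.List.bisectRight sv (2 * x))
    ↔ (x ≤ 2 * y ∧ y ≤ 2 * x) := by
  have hle : sv.Pairwise (· ≤ ·) := hlt.imp le_of_lt
  have hr : sv.idxOf y < sv.length := List.idxOf_lt_length_of_mem hmem
  have hsvr : sv[sv.idxOf y] = y := List.getElem_idxOf hr
  obtain ⟨hbL1, hbL2, hbL3⟩ := PySem.List.bisectLeft_spec sv (if x ≠ 0 then PySem.Int.floordiv (x + 1) 2 else 0) hle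
  obtain ⟨hbR1, hbR2, hbR3⟩ := PySem.List.bisectRight_spec sv (2 * x) hle
  have harith : ∀ z : Int, 0 ≤ z → ((if x ≠ 0 then PySem.Int.floordiv (x + 1) 2 else 0) ≤ z ↔ x ≤ 2 * z) := by
    intro z hz
    by_cases hx0 : x = 0
    · rw [hx0]
      simp
    · rw [if_pos hx0]
      constructor
      · intro hfz
        have hlow := (PySem.Int.floordiv_lt_iff_lt_mul
          (a := x + 1) (b := 2) (q := PySem.Int.floordiv (x + 1) 2 + 1) (by omega)).mp (by omega)
        omega
      · intro hxz
        have hlt2 := (PySem.Int.floordiv_lt_iff_lt_mul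
          (a := x + 1) (b := 2) (q := z + 1) (by omega)).mpr (by omega)
        omega
  constructor
  · rintro ⟨h1, h2⟩
    have hy1 := hbL3 (sv.idxOf y) hr h1
    have hy2 := hbR2 (sv.idxOf y) hr h2
    rw [hsvr] at hy1 hy2
    exact ⟨(harith y hy).mp hy1, hy2⟩
  · rintro ⟨h1, h2⟩
    constructor
    · by_contra hcon
      have := hbL2 (sv.idxOf y) hr (by omega)
      rw [hsvr] at this
      have := (harith y hy).mpr h1
      omega
    · by_contra hcon
      have := hbR3 (sv.idxOf y) hr (by omega)
      rw [hsvr] at this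
      omega

-- query_range over the bisect window counts exactly the perfect partners seen so far
theorem pv_qr (sv pref : List Int) (x : Int)
    (hsv_lt : sv.Pairwise (· < ·))
    (hx : 0 ≤ x) (hxm : x ∈ sv)
    (hpref0 : ∀ y ∈ pref, 0 ≤ y) (hprefm : ∀ y ∈ pref, y ∈ sv)
    (t : List Int) (hlen : t.length = sv.length + 1)
    (hinv : ∀ q : Nat, 1 ≤ q → q ≤ sv.length →
      t.getD q 0 = pvS (cntF sv pref) q - pvS (cntF sv pref) (q - lbN q)) :
    fenwickQueryRange ⟨t, (sv.length : Int)⟩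
      ((PySem.List.bisectLeft sv (if x ≠ 0 then PySem.Int.floordiv (x + 1) 2 else 0) : Nat) : Int)
      (((PySem.List.bisectRight sv (2 * x) : Nat) : Int) - 1)
      = ((pref.countP (pvQ x)) : Int) := by
  have hle : sv.Pairwise (· ≤ ·) := hsv_lt.imp le_of_lt
  set lbv := if x ≠ 0 then PySem.Int.floordiv (x + 1) 2 else 0 with hlbv
  set bL := PySem.List.bisectLeft sv lbv with hbL
  set bR := PySem.List.bisectRight sv (2 * x) with hbR
  have hbLlen : bL ≤ sv.length := (PySem.List.bisectLeft_spec sv lbv hle).1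
  have hbRlen : bR ≤ sv.length := (PySem.List.bisectRight_spec sv (2 * x) hle).1
  have hwin : ∀ y ∈ pref, pvQ x y = decide (bL < sv.idxOf y + 1 ∧ sv.idxOf y + 1 ≤ bR) := by
    intro y hy
    unfold pvQ
    rw [decide_eq_decide]
    rw [← pv_window sv hsv_lt x y hx (hpref0 y hy) (hprefm y hy)]
    rw [← hlbv]
    omega
  unfold fenwickQueryRange fenwickQuery
  by_cases hc : bR ≤ bL
  · rw [if_pos (by omega)]
    rw [List.countP_eq_zero.mpr ?_]
    · simp
    · intro y hy
      rw [hwin y hy]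
      simp
      omega
  · rw [if_neg (by omega)]
    have he1 : (((bR : Nat) : Int) - 1 + 1) = ((bR : Nat) : Int) := by ring
    have he2 : (((bL : Nat) : Int) - 1 + 1) = ((bL : Nat) : Int) := by ring
    rw [he1, he2]
    rw [pv_query t sv.length (cntF sv pref) hinv bR hbRlen 0]
    rw [pv_query t sv.length (cntF sv pref) hinv bL hbLlen 0]
    rw [pvS_cnt, pvS_cnt]
    rw [pv_countP_split pref (fun y => sv.idxOf y) bL bR (by omega)]
    rw [List.countP_congr (p := fun y => decide (bL < sv.idxOf y + 1 ∧ sv.idxOf y + 1 ≤ bR))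
      (q := pvQ x) (l := pref) (fun y hy => by rw [hwin y hy])]
    push_cast
    ring

-- the rank dict: folding inserts of (value, index) pairs
theorem pv_dict_notmem (l : List (Int × Int)) :
    ∀ (d : PySem.Dict Int Int) (k : Int), k ∉ l.map (·.2) →
      (l.foldl (fun d p => d.insert p.2 p.1) d).getD k 0 = d.getD k 0 := by
  induction l with
  | nil => intro d k _; rfl
  | cons q r ih =>
      intro d k hk
      simp only [List.map_cons, List.mem_cons] at hk
      rw [not_or] at hk
      simp only [List.foldl_cons]
      rw [ih (d.insert q.2 q.1) k hk.2]
      rw [PySem.Dict.getD_insert]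
      rw [if_neg hk.1]

theorem pv_dict_mem (l : List (Int × Int)) :
    ∀ (d : PySem.Dict Int Int), (l.map (·.2)).Nodup → ∀ p ∈ l,
      (l.foldl (fun d p => d.insert p.2 p.1) d).getD p.2 0 = p.1 := by
  induction l with
  | nil => intro d _ p hp; simp at hp
  | cons q r ih =>
      intro d hnd p hp
      simp only [List.map_cons, List.nodup_cons] at hnd
      simp only [List.foldl_cons]
      rcases List.mem_cons.mp hp with hpq | hpr
      · subst hpq
        rw [pv_dict_notmem r (d.insert p.2 p.1) p.2 hnd.1]
        rw [PySem.Dict.getD_insert, if_pos rfl]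
      · exact ih (d.insert q.2 q.1) hnd.2 p hpr

theorem pv_bump_cnt (sv pref : List Int) (x : Int) :
    pvBump (cntF sv pref) (sv.idxOf x + 1) 1 = cntF sv (pref ++ [x]) := by
  funext q
  unfold pvBump cntF
  rw [List.countP_append]
  have hsing : List.countP (fun y => decide (sv.idxOf y + 1 = q)) [x]
      = if sv.idxOf x + 1 = q then 1 else 0 := by
    rw [List.countP_cons, List.countP_nil]
    by_cases h : sv.idxOf x + 1 = q <;> simp [h]
  rw [hsing]
  by_cases h : q = sv.idxOf x + 1
  · rw [if_pos h, if_pos (by omega)]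
    push_cast
    ring
  · rw [if_neg h, if_neg (by omega)]
    simp

theorem pv_loopA (nums A sv : List Int) (rm : PySem.Dict Int Int)
    (hA : A = nums.map (fun x => |x|))
    (hsv_lt : sv.Pairwise (· < ·))
    (hsv_mem : ∀ y : Int, y ∈ sv ↔ y ∈ A)
    (hrm : ∀ y ∈ sv, rm.getD y 0 = ((sv.idxOf y : Nat) : Int)) :
    ∀ (d i : Nat) (t : List Int) (count : Int),
      nums.length - i ≤ d → i ≤ nums.length →
      t.length = sv.length + 1 →
      (∀ q : Nat, 1 ≤ q → q ≤ sv.length →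
        t.getD q 0 = pvS (cntF sv (A.take i)) q - pvS (cntF sv (A.take i)) (q - lbN q)) →
      perfectPairsLoop nums sv rm ⟨t, (sv.length : Int)⟩ count i nums.length
        = count + betweenCnt (A.take i) (A.drop i) + pairsCnt (A.drop i) := by
  have hAlen : A.length = nums.length := by rw [hA, List.length_map]
  have hA0 : ∀ y ∈ A, 0 ≤ y := by
    intro y hy
    rw [hA] at hy
    obtain ⟨z, _, hz⟩ := List.mem_map.mp hy
    rw [← hz]; exact abs_nonneg z
  intro d
  induction d with
  | zero =>
      intro i t count hd hi hlen hinv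
      rw [perfectPairsLoop]
      have hni : ¬ i < nums.length := by omega
      rw [if_neg hni]
      have hieq : i = nums.length := by omega
      have hdrop : A.drop i = [] := List.drop_eq_nil_of_le (by omega)
      rw [hdrop]
      simp [pairsCnt, betweenCnt]
  | succ d ihd =>
      intro i t count hd hi hlen hinv
      by_cases hin : i < nums.length
      · rw [perfectPairsLoop, if_pos hin]
        have hiA : i < A.length := by omega
        have hget : PySem.List.pyGetD nums ((i : Nat) : Int) 0 = nums[i] := by
          simp [PySem.List.pyGetD_natCast]
          exact List.getD_eq_getElem nums 0 hin
        have hAi : A[i] = |nums[i]| := by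
          simp [hA]
        have hxA : |PySem.List.pyGetD nums ((i : Nat) : Int) 0| = A[i] := by
          rw [hget, hAi]
        rw [hxA]
        simp only []
        have hxm : A[i] ∈ sv := (hsv_mem A[i]).mpr (List.getElem_mem hiA)
        have hx0 : 0 ≤ A[i] := hA0 A[i] (List.getElem_mem hiA)
        have hr : sv.idxOf A[i] < sv.length := List.idxOf_lt_length_of_mem hxm
        -- the query counts the earlier perfect partners
        have hq := pv_qr sv (A.take i) A[i] hsv_lt hx0 hxm
          (fun y hy => hA0 y (List.mem_of_mem_take hy))
          (fun y hy => (hsv_mem y).mpr (List.mem_of_mem_take hy))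
          t hlen hinv
        rw [hq]
        -- the update step
        rw [hrm A[i] hxm]
        have hupidx : (((sv.idxOf A[i] : Nat) : Int) + 1) = (((sv.idxOf A[i] + 1 : Nat)) : Int) := by push_cast; ring
        have hupd := pv_update t sv.length (sv.idxOf A[i] + 1) 1 (cntF sv (A.take i))
          (by omega) (by omega) hlen hinv
        rw [pv_bump_cnt sv (A.take i) A[i]] at hupd
        have htake : A.take (i + 1) = A.take i ++ [A[i]] := List.take_succ_eq_append_getElem hiA
        have hdrop : A.drop i = A[i] :: A.drop (i + 1) := List.drop_eq_getElem_cons hiA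
        have hcall := ihd (i + 1)
          (fenwickUpdateLoop t ((sv.length : Nat) : Int) (((sv.idxOf A[i] + 1 : Nat)) : Int) 1)
          (count + ((List.countP (pvQ A[i]) (A.take i) : Nat) : Int))
          (by omega) (by omega) hupd.1 (by rw [htake]; exact hupd.2)
        unfold fenwickUpdate
        simp only []
        rw [hupidx]
        rw [hcall]
        rw [htake, hdrop]
        rw [betweenCnt_append_singleton]
        simp only [betweenCnt, pairsCnt]
        ring
      · rw [perfectPairsLoop, if_neg hin]
        have hdrop : A.drop i = [] := List.drop_eq_nil_of_le (by omega)
        rw [hdrop]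
        simp [pairsCnt, betweenCnt]

theorem pv_perfectPairs_eq (nums : List Int) :
    perfectPairs nums = pairsCnt (nums.map (fun x => |x|)) := by
  unfold perfectPairs
  simp only []
  have hvs : nums.foldl (fun s x => PySem.Set.add s |x|) PySem.Set.empty
      = PySem.Set.ofList (nums.map (fun x => |x|)) := by
    rw [← PySem.Set.update_map_eq_foldl_add]
    exact PySem.Set.update_nil_left _
  rw [hvs]
  set A := nums.map (fun x => |x|) with hA
  set sv := PySem.List.sorted (PySem.Set.ofList A) (fun v => v) false with hsv
  have hlt : sv.Pairwise (· < ·) := PySem.List.sorted_ofList_pairwise_lt A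
  have hmem : ∀ y : Int, y ∈ sv ↔ y ∈ A := by
    intro y
    rw [hsv, PySem.List.mem_sorted, PySem.Set.mem_ofList]
  have hnd : sv.Nodup := hlt.imp (fun h => ne_of_lt h)
  have hkeys : (PySem.List.enumerate sv 0).map (·.2) = sv := PySem.List.map_snd_enumerate sv 0
  have hrm : ∀ y ∈ sv,
      ((PySem.List.enumerate sv 0).foldl (fun d p => d.insert p.2 p.1) PySem.Dict.empty).getD y 0
        = ((sv.idxOf y : Nat) : Int) := by
    intro y hy
    have hr : sv.idxOf y < sv.length := List.idxOf_lt_length_of_mem hy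
    have hgete : sv[sv.idxOf y] = y := List.getElem_idxOf hr
    have hpmem : ((0 + (sv.idxOf y : Int), y) : Int × Int) ∈ PySem.List.enumerate sv 0 := by
      rw [PySem.List.mem_enumerate_iff]
      exact ⟨sv.idxOf y, hr, by rw [hgete]⟩
    have := pv_dict_mem (PySem.List.enumerate sv 0) PySem.Dict.empty
      (by rw [hkeys]; exact hnd) _ hpmem
    simpa using this
  unfold fenwickInit
  have htn : (((sv.length : Int)) + 1).toNat = sv.length + 1 := by omega
  rw [htn]
  have hres := pv_loopA nums A sv _ hA hlt hmem hrm nums.length 0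
    (List.replicate (sv.length + 1) 0) 0 (by omega) (by omega)
    (by rw [List.length_replicate])
    (by
      intro q h1 h2
      have hget : (List.replicate (sv.length + 1) (0 : Int)).getD q 0 = 0 := by
        rw [List.getD_eq_getElem?_getD, List.getElem?_replicate]
        split <;> rfl
      rw [hget, List.take_zero]
      rw [pvS_cnt, pvS_cnt]
      simp)
  rw [hres]
  rw [List.take_zero, List.drop_zero, betweenCnt_nil]
  ring

-- ---- B side: the two-pointer loop ----

theorem pv_getD_mono (s : List Int) (hle : s.Pairwise (· ≤ ·)) (k m : Nat)
    (hkm : k ≤ m) (hm : m < s.length) : s.getD k 0 ≤ s.getD m 0 := by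
  rcases eq_or_lt_of_le hkm with h | h
  · rw [h]
  · have hk : k < s.length := by omega
    rw [List.getD_eq_getElem s 0 hk, List.getD_eq_getElem s 0 hm]
    exact List.pairwise_iff_getElem.mp hle k m hk hm h

theorem pv_adv_spec (s : List Int) (sj : Int) (j : Nat) :
    ∀ (d i : Nat), j - i ≤ d → i ≤ j →
      (∀ k, k < i → 2 * s.getD k 0 < sj) →
      i ≤ altAdvance s sj i j ∧ altAdvance s sj i j ≤ j ∧
      (∀ k, k < altAdvance s sj i j → 2 * s.getD k 0 < sj) ∧
      (altAdvance s sj i j < j → sj ≤ 2 * s.getD (altAdvance s sj i j) 0) := by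
  intro d
  induction d with
  | zero =>
      intro i hd hij H
      have : i = j := by omega
      rw [altAdvance, dif_neg (by omega)]
      exact ⟨le_refl i, hij, H, by omega⟩
  | succ d ihd =>
      intro i hd hij H
      by_cases hlt : i < j
      · rw [altAdvance, dif_pos hlt]
        by_cases hc : 2 * s.getD i 0 < sj
        · rw [if_pos hc]
          have H' : ∀ k, k < i + 1 → 2 * s.getD k 0 < sj := by
            intro k hk
            rcases Nat.lt_or_ge k i with h | h
            · exact H k h
            · have : k = i := by omega
              rw [this]; exact hc
          obtain ⟨a1, a2, a3, a4⟩ := ihd (i + 1) (by omega) (by omega) H'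
          exact ⟨by omega, a2, a3, a4⟩
        · rw [if_neg hc]
          exact ⟨le_refl i, hij, H, fun _ => by omega⟩
      · rw [altAdvance, dif_neg hlt]
        exact ⟨le_refl i, hij, H, fun h => absurd h hlt⟩

theorem pv_count_zero (s : List Int) (p : Int → Bool) :
    ∀ m : Nat, m ≤ s.length → (∀ k, k < m → p (s.getD k 0) = false) →
      (s.take m).countP p = 0 := by
  intro m
  induction m with
  | zero => intro _ _; simp
  | succ m ih =>
      intro hm hp
      have hms : m < s.length := by omega
      rw [List.take_succ_eq_append_getElem hms, List.countP_append, ih (by omega) (fun k hk => hp k (by omega))]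
      have : p s[m] = false := by
        have := hp m (by omega)
        rwa [List.getD_eq_getElem s 0 hms] at this
      simp [this]

theorem pv_count_window (s : List Int) (p : Int → Bool) :
    ∀ (j i' : Nat), i' ≤ j → j ≤ s.length →
      (∀ k, k < i' → p (s.getD k 0) = false) →
      (∀ k, i' ≤ k → k < j → p (s.getD k 0) = true) →
      (s.take j).countP p = j - i' := by
  intro j
  induction j with
  | zero =>
      intro i' h1 _ _ _
      simp
  | succ j ih =>
      intro i' h1 h2 hlo hhi
      by_cases hej : i' = j + 1
      · rw [pv_count_zero s p (j + 1) h2 (fun k hk => hlo k (by omega))]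
        omega
      · have hij : i' ≤ j := by omega
        have hjs : j < s.length := by omega
        rw [List.take_succ_eq_append_getElem hjs, List.countP_append]
        rw [ih i' hij (by omega) hlo (fun k hk1 hk2 => hhi k hk1 (by omega))]
        have hpj : p s[j] = true := by
          have := hhi j hij (by omega)
          rwa [List.getD_eq_getElem s 0 hjs] at this
        simp [hpj]
        omega

theorem pv_loopB (s : List Int) (hle : s.Pairwise (· ≤ ·)) (h0 : ∀ y ∈ s, 0 ≤ y) :
    ∀ (d j i : Nat) (count : Int), s.length - j ≤ d → j ≤ s.length → i ≤ j →
      (j < s.length → ∀ k, k < i → 2 * s.getD k 0 < s.getD j 0) →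
      altLoop s i j s.length count
        = count + betweenCnt (s.take j) (s.drop j) + pairsCnt (s.drop j) := by
  intro d
  induction d with
  | zero =>
      intro j i count hd hj hij H
      rw [altLoop, if_neg (by omega)]
      have : s.drop j = [] := List.drop_eq_nil_of_le (by omega)
      rw [this]
      simp [pairsCnt, betweenCnt]
  | succ d ihd =>
      intro j i count hd hj hij H
      by_cases hjs : j < s.length
      · rw [altLoop, if_pos hjs]
        simp only []
        obtain ⟨h1, h2, h3, h4⟩ := pv_adv_spec s (s.getD j 0) j (j - i) i (by omega) hij (H hjs)
        set i' := altAdvance s (s.getD j 0) i j with hi'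
        have hsj0 : 0 ≤ s.getD j 0 := by
          rw [List.getD_eq_getElem s 0 hjs]
          exact h0 _ (List.getElem_mem hjs)
        -- the window count
        have hcw : (s.take j).countP (fun y => decide (s.getD j 0 ≤ 2 * y)) = j - i' := by
          apply pv_count_window s _ j i' h2 (by omega)
          · intro k hk
            have := h3 k hk
            simp only [decide_eq_false_iff_not]
            omega
          · intro k hk1 hk2
            have hi'j : i' < j := by omega
            have := h4 hi'j
            have hmono := pv_getD_mono s hle i' k hk1 (by omega)
            simp only [decide_eq_true_eq]
            omega
        -- windows are perfect-pair tests on a sorted prefix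
        have hcongr : (s.take j).countP (pvQ (s.getD j 0)) = (s.take j).countP (fun y => decide (s.getD j 0 ≤ 2 * y)) := by
          apply List.countP_congr
          intro y hy
          obtain ⟨k, hk, hky⟩ := List.mem_iff_getElem.mp hy
          have hkj : k < j := by
            have := hk
            simp [List.length_take] at this
            omega
          have hyk : y = s.getD k 0 := by
            rw [List.getD_eq_getElem s 0 (by omega)]
            rw [← hky, List.getElem_take]
          have hyle : y ≤ s.getD j 0 := by
            rw [hyk]; exact pv_getD_mono s hle k j (by omega) hjs
          have hy0 : 0 ≤ y := by
            rw [hyk, List.getD_eq_getElem s 0 (by omega)]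
            exact h0 _ (List.getElem_mem (by omega))
          unfold pvQ
          simp only [decide_eq_true_eq]
          constructor
          · intro hq; exact hq.1
          · intro hq; exact ⟨hq, by omega⟩
        have hcall := ihd (j + 1) i' (count + ((j : Nat) : Int) - ((i' : Nat) : Int)) (by omega) (by omega) (by omega)
          (by
            intro hj1 k hk
            have := h3 k hk
            have hmono := pv_getD_mono s hle j (j + 1) (by omega) hj1
            omega)
        rw [hcall]
        have htake : s.take (j + 1) = s.take j ++ [s[j]] := List.take_succ_eq_append_getElem hjs
        have hdrop : s.drop j = s[j] :: s.drop (j + 1) := List.drop_eq_getElem_cons hjs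
        rw [htake, hdrop, betweenCnt_append_singleton]
        simp only [betweenCnt, pairsCnt]
        have hgj : s.getD j 0 = s[j] := List.getD_eq_getElem s 0 hjs
        rw [← hgj]
        have hc2 : ((List.countP (pvQ (s.getD j 0)) (List.take j s) : Nat) : Int)
            = ((j : Nat) : Int) - ((i' : Nat) : Int) := by
          rw [hcongr, hcw]
          omega
        rw [hc2]
        ring
      · rw [altLoop, if_neg (by omega)]
        have : s.drop j = [] := List.drop_eq_nil_of_le (by omega)
        rw [this]
        simp [pairsCnt, betweenCnt]

theorem pv_alt_eq (nums : List Int) :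
    perfectPairs_alt nums = pairsCnt (nums.map (fun x => |x|)) := by
  unfold perfectPairs_alt
  simp only []
  set A := nums.map (fun x => |x|) with hA
  set s := PySem.List.sorted A (fun v => v) false with hs
  have hperm : s.Perm A := PySem.List.sorted_perm A (fun v => v) false
  have hle : s.Pairwise (· ≤ ·) := PySem.List.sorted_pairwise A (fun v => v)
  have h0 : ∀ y ∈ s, 0 ≤ y := by
    intro y hy
    have : y ∈ A := hperm.mem_iff.mp hy
    rw [hA] at this
    obtain ⟨z, _, hz⟩ := List.mem_map.mp this
    rw [← hz]
    exact abs_nonneg z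
  rw [pv_loopB s hle h0 s.length 0 0 0 (by omega) (by omega) (by omega) (by intro _ k hk; omega)]
  rw [List.take_zero, List.drop_zero, betweenCnt_nil]
  rw [pairsCnt_perm s A hperm]
  ring

-- ===== VERDICT (by name: the statement is the Claim_ definition above) =====
theorem perfectPairs_spec : Claim_equal_perfectPairs := by
  unfold Claim_equal_perfectPairs Spec_perfectPairs
  intro nums _
  rw [pv_perfectPairs_eq, pv_alt_eq]
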